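-- pv_equiv track=rewrite | github.com/A1pha3/ai-hedge-fund | src/paper_trading/_btst_reporting/brief_builder.py | _build_btst_brief_decision_counts
-- ===== SOURCE A (Python) =====
-- from typing import Any
--
-- def _build_btst_brief_decision_counts(
--     selection_targets: dict[str, Any],
-- ) -> dict[str, int]:
--     short_trade_decisions = [
--         (entry.get("short_trade") or {}).get("decision")
--         for entry in selection_targets.values()
--         if entry.get("short_trade")
--     ]
--     return {
--         "blocked_count": sum(
--             1 for decision in short_trade_decisions if decision == "blocked"
--         ),
--         "rejected_count": sum(
--             1 for decision in short_trade_decisions if decision == "rejected"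
--         ),
--         "research_selected_count": sum(
--             1
--             for entry in selection_targets.values()
--             if (entry.get("research") or {}).get("decision") == "selected"
--         ),
--     }
-- ===== SOURCE B (Python) =====
-- from typing import Any
--
-- def _build_btst_brief_decision_counts(
--     selection_targets: dict[str, Any],
-- ) -> dict[str, int]:
--     blocked_count = 0
--     rejected_count = 0
--     research_selected_count = 0
--     for entry in selection_targets.values():
--         short_trade = entry.get("short_trade")
--         if short_trade:
--             decision = short_trade.get("decision")
--             if decision == "blocked":
--                 blocked_count += 1
--             elif decision == "rejected":
--                 rejected_count += 1
--         research = entry.get("research")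
--         if research is not None and research.get("decision") == "selected":
--             research_selected_count += 1
--     return {
--         "blocked_count": blocked_count,
--         "rejected_count": rejected_count,
--         "research_selected_count": research_selected_count,
--     }
-- ===== Notes on version B (the rewrite author's own statement) =====
-- stated objective: simpler
-- what changed: B replaces A's intermediate decision list and three separate generator passes by one pass over the entries maintaining three integer counters.
import Mathlib
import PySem

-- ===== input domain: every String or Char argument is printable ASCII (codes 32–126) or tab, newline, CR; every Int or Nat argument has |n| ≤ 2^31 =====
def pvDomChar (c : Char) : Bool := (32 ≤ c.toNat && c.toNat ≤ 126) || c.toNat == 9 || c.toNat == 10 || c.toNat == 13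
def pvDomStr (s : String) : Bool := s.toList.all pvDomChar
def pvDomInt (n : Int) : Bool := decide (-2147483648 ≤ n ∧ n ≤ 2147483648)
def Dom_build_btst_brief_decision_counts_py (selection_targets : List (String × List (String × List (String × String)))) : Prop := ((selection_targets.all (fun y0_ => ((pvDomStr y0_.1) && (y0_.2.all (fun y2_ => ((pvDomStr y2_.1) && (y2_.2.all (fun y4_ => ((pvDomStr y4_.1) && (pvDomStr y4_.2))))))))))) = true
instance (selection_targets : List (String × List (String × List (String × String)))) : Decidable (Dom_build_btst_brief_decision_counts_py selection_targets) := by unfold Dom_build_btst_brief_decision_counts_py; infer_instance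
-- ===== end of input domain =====

-- B replaces A's intermediate decision list and three separate counting passes by one
-- fold over the entries carrying three integer counters (objective: simpler).


-- ===== PORT A =====
-- dicts are association lists; `d.get(k)` is first-match lookup (List.lookup), `or {}` is getD []
def build_btst_brief_decision_counts_py (selection_targets : List (String × List (String × List (String × String)))) : List (String × Int) :=
  let short_trade_decisions : List (Option String) :=
    ((selection_targets.map Prod.snd).filter
        (fun entry => !((List.lookup "short_trade" entry).getD []).isEmpty)).map
      (fun entry => List.lookup "decision" ((List.lookup "short_trade" entry).getD []))
  [("blocked_count", (short_trade_decisions.countP (fun d => d == some "blocked") : Int)),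
   ("rejected_count", (short_trade_decisions.countP (fun d => d == some "rejected") : Int)),
   ("research_selected_count",
     ((selection_targets.map Prod.snd).countP
        (fun entry => List.lookup "decision" ((List.lookup "research" entry).getD []) == some "selected") : Int))]

-- ===== PORT B =====
-- one fold over the entries, carrying (blocked_count, rejected_count, research_selected_count)
def pvStep (acc : Int × Int × Int) (kv : String × List (String × List (String × String))) : Int × Int × Int :=
  let entry := kv.2
  let short_trade := List.lookup "short_trade" entry
  let acc :=
    if !(short_trade.getD []).isEmpty then
      let decision := List.lookup "decision" (short_trade.getD [])
      if decision == some "blocked" then (acc.1 + 1, acc.2.1, acc.2.2)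
      else if decision == some "rejected" then (acc.1, acc.2.1 + 1, acc.2.2)
      else acc
    else acc
  let research := List.lookup "research" entry
  if research.isSome && (List.lookup "decision" (research.getD []) == some "selected") then
    (acc.1, acc.2.1, acc.2.2 + 1)
  else acc

def build_btst_brief_decision_counts_py_alt (selection_targets : List (String × List (String × List (String × String)))) : List (String × Int) :=
  let acc := selection_targets.foldl pvStep (0, 0, 0)
  [("blocked_count", acc.1), ("rejected_count", acc.2.1), ("research_selected_count", acc.2.2)]

-- ===== PRECONDITION & SPEC =====
def Spec_build_btst_brief_decision_counts_py (selection_targets : List (String × List (String × List (String × String)))) (out : List (String × Int)) : Prop := out = build_btst_brief_decision_counts_py_alt selection_targets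
instance (selection_targets : List (String × List (String × List (String × String)))) (out : List (String × Int)) : Decidable (Spec_build_btst_brief_decision_counts_py selection_targets out) := by unfold Spec_build_btst_brief_decision_counts_py; infer_instance

-- ===== CLAIM (what is proved, stated in full; the proofs are below) =====
def Claim_equal_build_btst_brief_decision_counts_py : Prop := ∀ (selection_targets : List (String × List (String × List (String × String)))), Dom_build_btst_brief_decision_counts_py selection_targets → Spec_build_btst_brief_decision_counts_py selection_targets (build_btst_brief_decision_counts_py selection_targets)

-- ===== LEMMAS AND PROOFS =====

def pvQ (entry : List (String × List (String × String))) : Bool :=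
  !((List.lookup "short_trade" entry).getD []).isEmpty
def pvG (entry : List (String × List (String × String))) : Option String :=
  List.lookup "decision" ((List.lookup "short_trade" entry).getD [])
def pvS (entry : List (String × List (String × String))) : Bool :=
  List.lookup "decision" ((List.lookup "research" entry).getD []) == some "selected"

lemma pv_isSome_and (o : Option (List (String × String))) :
    (o.isSome && (List.lookup "decision" (o.getD []) == some "selected"))
      = (List.lookup "decision" (o.getD []) == some "selected") := by
  cases o <;> simp [List.lookup]

lemma pvStep_eq (acc : Int × Int × Int) (kv : String × List (String × List (String × String))) :
    pvStep acc kv =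
      (acc.1 + (if pvQ kv.2 && (pvG kv.2 == some "blocked") then 1 else 0),
       acc.2.1 + (if pvQ kv.2 && (pvG kv.2 == some "rejected") then 1 else 0),
       acc.2.2 + (if pvS kv.2 then 1 else 0)) := by
  simp only [pvStep, pvQ, pvG, pvS, pv_isSome_and]
  by_cases hq : ((List.lookup "short_trade" kv.2).getD []).isEmpty = true <;>
    by_cases hb : (List.lookup "decision" ((List.lookup "short_trade" kv.2).getD []) == some "blocked") = true <;>
    by_cases hj : (List.lookup "decision" ((List.lookup "short_trade" kv.2).getD []) == some "rejected") = true <;>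
    by_cases hs : (List.lookup "decision" ((List.lookup "research" kv.2).getD []) == some "selected") = true <;>
    simp [hq, hb, hj, hs] <;> simp_all

lemma pvCntB (v : String) (e : List (String × List (String × String)))
    (l : List (List (String × List (String × String)))) :
    ((List.filter pvQ (e :: l)).map pvG).countP (fun d => d == some v)
      = (if pvQ e && (pvG e == some v) then 1 else 0)
        + ((List.filter pvQ l).map pvG).countP (fun d => d == some v) := by
  by_cases hq : pvQ e = true <;>
    by_cases hv : (pvG e == some v) = true <;>
    simp [List.filter_cons, hq, hv, List.countP_cons, Nat.add_comm]

lemma pvFoldl_eq (l : List (String × List (String × List (String × String)))) (a : Int × Int × Int) :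
    l.foldl pvStep a =
      (a.1 + ((((l.map Prod.snd).filter pvQ).map pvG).countP (fun d => d == some "blocked") : Int),
       a.2.1 + ((((l.map Prod.snd).filter pvQ).map pvG).countP (fun d => d == some "rejected") : Int),
       a.2.2 + (((l.map Prod.snd).countP pvS : Nat) : Int)) := by
  induction l generalizing a with
  | nil => simp
  | cons x t ih =>
    rw [List.foldl_cons, pvStep_eq, ih]
    simp only [List.map_cons, pvCntB, List.countP_cons]
    refine Prod.ext ?_ (Prod.ext ?_ ?_) <;> simp <;> split_ifs <;> omega

-- ===== VERDICT (by name: the statement is the Claim_ definition above) =====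
theorem build_btst_brief_decision_counts_py_spec : Claim_equal_build_btst_brief_decision_counts_py := by
  intro st _
  unfold Spec_build_btst_brief_decision_counts_py build_btst_brief_decision_counts_py build_btst_brief_decision_counts_py_alt
  rw [pvFoldl_eq]
  unfold pvQ pvG pvS
  simp [Function.comp_def]
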